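-- pv_equiv track=rewrite | github.com/HAAIL-Universe/AgentZero | A2/work/V197_delay_game_optimization/delay_game_optimization.py | _bits_needed
-- ===== SOURCE A (Python) =====
-- def _bits_needed(n):
--     """Number of bits to encode n distinct values (0..n-1)."""
--     if n <= 1:
--         return 1
--     b = 0
--     v = n - 1
--     while v > 0:
--         b += 1
--         v >>= 1
--     return b
-- ===== SOURCE B (Python) =====
-- def _bits_needed(n):
--     """Number of bits to encode n distinct values (0..n-1)."""
--     if n <= 1:
--         return 1
--     return (n - 1).bit_length()
-- ===== Notes on version B (the rewrite author's own statement) =====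
-- stated objective: idiomatic
-- what changed: The hand-written shift-and-count while loop is replaced by a single closed-form call to int.bit_length on n-1, keeping the n<=1 guard.
import Mathlib
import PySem

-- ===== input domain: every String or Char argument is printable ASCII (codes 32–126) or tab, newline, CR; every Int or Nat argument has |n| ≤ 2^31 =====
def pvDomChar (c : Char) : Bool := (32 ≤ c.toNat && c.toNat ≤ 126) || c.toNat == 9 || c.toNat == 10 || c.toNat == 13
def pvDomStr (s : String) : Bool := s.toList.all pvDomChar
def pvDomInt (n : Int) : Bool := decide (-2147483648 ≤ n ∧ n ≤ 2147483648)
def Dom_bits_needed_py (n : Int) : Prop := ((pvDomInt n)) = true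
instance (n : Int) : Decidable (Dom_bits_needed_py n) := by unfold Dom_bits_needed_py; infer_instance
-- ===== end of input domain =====

-- B replaces A's shift-and-count while loop by the closed-form builtin (n-1).bit_length(); idiomatic one-liner.

-- ===== PORT A =====
-- the 'while v > 0: b += 1; v >>= 1' loop (>>1 on these ints = floor division by 2)
def bitsLoopA (b : Int) (v : Int) : Int :=
  if h : v > 0 then bitsLoopA (b + 1) (PySem.Int.floordiv v 2) else b
termination_by v.toNat
decreasing_by
  simp only [PySem.Int.floordiv]
  rw [Int.fdiv_eq_ediv_of_nonneg _ (by norm_num)]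
  omega

def bits_needed_py (n : Int) : Int :=
  if n ≤ 1 then 1 else bitsLoopA 0 (n - 1)

-- ===== PORT B =====
-- (n-1).bit_length() for n-1 ≥ 1 is Nat.size of its toNat
def bits_needed_py_alt (n : Int) : Int :=
  if n ≤ 1 then 1 else (Nat.size (n - 1).toNat : Int)

-- ===== PRECONDITION & SPEC =====
def Spec_bits_needed_py (n : Int) (out : Int) : Prop := out = bits_needed_py_alt n
instance (n : Int) (out : Int) : Decidable (Spec_bits_needed_py n out) := by unfold Spec_bits_needed_py; infer_instance

-- ===== CLAIM (what is proved, stated in full; the proofs are below) =====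
def Claim_equal_bits_needed_py : Prop := ∀ (n : Int), Dom_bits_needed_py n → Spec_bits_needed_py n (bits_needed_py n)

-- ===== LEMMAS AND PROOFS =====
theorem size_div2_succ (n : Nat) (h : 0 < n) : Nat.size n = Nat.size (n / 2) + 1 := by
  conv_lhs => rw [← Nat.bit_bodd_div2 n]
  rw [Nat.size_bit (by rw [Nat.bit_bodd_div2]; omega), Nat.div2_val]

theorem bitsLoopA_eq_size (v : Int) (b : Int) : bitsLoopA b v = b + (Nat.size v.toNat : Int) := by
  induction hk : v.toNat using Nat.strong_induction_on generalizing v b with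
  | _ k ih =>
    rw [bitsLoopA]
    split_ifs with h
    · have hdiv : (PySem.Int.floordiv v 2).toNat = v.toNat / 2 := by
        simp only [PySem.Int.floordiv]
        rw [Int.fdiv_eq_ediv_of_nonneg _ (by norm_num)]
        omega
      rw [ih ((PySem.Int.floordiv v 2).toNat) (by omega) _ _ rfl, hdiv, ← hk,
        size_div2_succ v.toNat (by omega)]
      push_cast
      ring
    · have : v.toNat = 0 := by omega
      rw [this] at hk
      rw [← hk, Nat.size_zero]
      simp

-- ===== VERDICT (by name: the statement is the Claim_ definition above) =====
theorem bits_needed_py_spec : Claim_equal_bits_needed_py := by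
  intro n _
  unfold Spec_bits_needed_py bits_needed_py bits_needed_py_alt
  split_ifs with h
  · rfl
  · simpa using bitsLoopA_eq_size (n - 1) 0
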